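-- pv_equiv track=rewrite | github.com/fraserpatrick/MAINREPO | Python/CS310/MUI.py | breadth_first_dictionarysearch
-- ===== SOURCE A (Python) =====
-- def next_states(string):
--     output = []
--     if len(string) == 0:
--         return []
--
--     if string[len(string)-1] == "I":
--         output.append(string + "U")
--
--     if string[0] == "M":
--         output.append(string + string[1:])
--
--     for i in range(len(string)-2):
--         if string[i] == "I" and string[i+1] == "I" and string[i+2] == "I":
--             output.append(string[:i] + "U" + string[i+3:])
--
--     index = 0
--     while "UU" in string[index:]:
--         index = string.index("UU",index)
--         output.append(string[:index] + string[index+2:])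
--         index += 1
--
--     results = []
--     for out in output:
--         if out not in results:
--             results.append(out)
--
--     return output
--
-- def breadth_first_dictionarysearch(goal):
--     agenda = ["MI"]
--     extendCount, agendaMaxLen = 0,0
--     visited = set()
--     ancestors = {"MI":None}
--     path = []
--     limit = 10000
--
--     while extendCount < limit:
--         agendaMaxLen = max(agendaMaxLen, len(agenda))
--         currentNode = agenda.pop(0)
--
--         if currentNode == goal:
--             while currentNode != "MI":
--                 path.append(currentNode)
--                 currentNode = ancestors[currentNode]
--             path.append("MI")
--             path.reverse()
--             return path, extendCount, agendaMaxLen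
--
--         extendCount += 1
--         newNodes = next_states(currentNode)
--         for node in newNodes:
--             if node not in visited:
--                 visited.add(node)
--                 agenda.append(node)
--                 ancestors[node] = currentNode
--
--     return ["MI"], extendCount, agendaMaxLen
-- ===== SOURCE B (Python) =====
-- def next_states(string):
--     output = []
--     if len(string) == 0:
--         return []
--
--     if string[len(string)-1] == "I":
--         output.append(string + "U")
--
--     if string[0] == "M":
--         output.append(string + string[1:])
--
--     for i in range(len(string)-2):
--         if string[i] == "I" and string[i+1] == "I" and string[i+2] == "I":
--             output.append(string[:i] + "U" + string[i+3:])
--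
--     index = 0
--     while "UU" in string[index:]:
--         index = string.index("UU",index)
--         output.append(string[:index] + string[index+2:])
--         index += 1
--
--     return output
--
--
-- def breadth_first_dictionarysearch(goal):
--     # Same FIFO BFS (same pop order, same visited updates, same counters),
--     # but each agenda entry carries its own derivation path, so the goal's
--     # path is returned directly instead of being rebuilt by backtracking
--     # through a parent-pointer dictionary.
--     agenda = [("MI", ["MI"])]
--     extendCount, agendaMaxLen = 0, 0
--     visited = set()
--     limit = 10000
--
--     while extendCount < limit:
--         agendaMaxLen = max(agendaMaxLen, len(agenda))
--         currentNode, path = agenda.pop(0)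
--
--         if currentNode == goal:
--             return path, extendCount, agendaMaxLen
--
--         extendCount += 1
--         for node in next_states(currentNode):
--             if node not in visited:
--                 visited.add(node)
--                 agenda.append((node, path + [node]))
--
--     return ["MI"], extendCount, agendaMaxLen
-- ===== Notes on version B (the rewrite author's own statement) =====
-- stated objective: simpler
-- what changed: Same FIFO BFS over MU-puzzle states (same pop order, visited set and counters), but each agenda entry carries its derivation path, so the goal's path is returned directly and the ancestors parent-pointer dictionary and the whole backtrack-and-reverse loop disappear.
import Mathlib
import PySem

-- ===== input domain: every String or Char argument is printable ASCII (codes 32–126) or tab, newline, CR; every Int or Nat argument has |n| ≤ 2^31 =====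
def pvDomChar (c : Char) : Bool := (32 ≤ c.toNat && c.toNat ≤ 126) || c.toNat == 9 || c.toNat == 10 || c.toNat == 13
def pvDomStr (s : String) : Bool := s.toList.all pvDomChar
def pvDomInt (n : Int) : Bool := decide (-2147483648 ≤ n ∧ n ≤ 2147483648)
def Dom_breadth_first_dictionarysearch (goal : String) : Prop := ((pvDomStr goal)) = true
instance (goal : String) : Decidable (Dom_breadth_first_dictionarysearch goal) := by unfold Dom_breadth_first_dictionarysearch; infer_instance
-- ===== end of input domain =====

-- B keeps A's FIFO BFS but carries the derivation path in each agenda entry instead of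
-- rebuilding it from a parent-pointer dictionary (objective: simpler — no ancestors dict,
-- no backtracking loop).  Return-value equivalence only; neither version mutates its argument.

-- ===== PORT A =====
-- next_states is shared verbatim by A and B (Source B copies it unchanged).
-- The Python III loop 'for i in range(len(s)-2): if s[i]==s[i+1]==s[i+2]=="I": append s[:i]+"U"+s[i+3:]'
-- enumerates exactly the match positions in increasing order; pvIII is that scan as one
-- structural pass over the characters (pre = reversed prefix s[:i]); exact.
def pvIII : List Char → List Char → List (List Char)
  | pre, a :: b :: c :: t =>
      (if a = 'I' ∧ b = 'I' ∧ c = 'I' then [pre.reverse ++ 'U' :: t] else [])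
        ++ pvIII (a :: pre) (b :: c :: t)
  | _, _ => []

-- The Python UU loop 'index=0; while "UU" in s[index:]: index=s.index("UU",index); append
-- s[:index]+s[index+2:]; index+=1' outputs one string per position i with s[i]==s[i+1]=="U",
-- in increasing order of i; pvUU is that scan as one structural pass; exact.
def pvUU : List Char → List Char → List (List Char)
  | pre, a :: b :: t =>
      (if a = 'U' ∧ b = 'U' then [pre.reverse ++ t] else [])
        ++ pvUU (a :: pre) (b :: t)
  | _, _ => []

-- (the Python function also builds a deduplicated list 'results' that it neither returns
-- nor uses — a dead store, omitted here)
def next_states (s : String) : List String :=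
  let cs := s.toList
  if cs.length = 0 then []
  else
    ((if cs.getLast? = some 'I' then [cs ++ ['U']] else [])        -- s[len(s)-1] == "I", len > 0
      ++ (if cs.head? = some 'M' then [cs ++ cs.tail] else [])     -- s[0] == "M": s + s[1:]
      ++ pvIII [] cs
      ++ pvUU [] cs).map (fun l => String.ofList l)

-- ancestors: the Python dict is only ever read by single-key lookup, so it is ported as a
-- newest-binding-first association list (same lookup semantics: last write wins; O(1) insert).
def ancGet : List (String × Option String) → String → Option (Option String)
  | [], _ => none
  | (k, v) :: t, x => if k = x then some v else ancGet t x

-- the backtracking while-loop of A ('while currentNode != "MI": path.append(...); currentNode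
-- = ancestors[currentNode]'); fuel only makes the recursion total (a missing key would be a
-- KeyError in Python; both guard arms are unreachable, as the proof shows)
def btkA (anc : List (String × Option String)) : Nat → String → List String → List String
  | 0, _, _ => []
  | fuel + 1, cur, path =>
      if cur = "MI" then (path ++ ["MI"]).reverse
      else match ancGet anc cur with
        | some (some m) => btkA anc fuel m (path ++ [cur])
        | _ => []

-- agenda.pop(0) on a FIFO list, kept as a front/back functional queue (same pop sequence as
-- the Python list; the length is tracked separately as alen).  none = pop from an empty list
-- (IndexError in Python; unreachable from the initial agenda ["MI"]).
def popQ {α : Type} : List α → List α → Option (α × List α × List α)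
  | c :: f, b => some (c, f, b)
  | [], b => match b.reverse with
      | c :: f => some (c, f, [])
      | [] => none

-- A's inner for-loop over newNodes: visited.add / agenda.append / ancestors[node] = currentNode
def expA (c : String) (ns : List String)
    (st : Std.TreeSet String × List String × List (String × Option String) × Int) :
    Std.TreeSet String × List String × List (String × Option String) × Int :=
  ns.foldl (fun st n => match st with
    | (v, bk, an, al) =>
        if v.contains n then (v, bk, an, al)
        else (v.insert n, n :: bk, (n, some c) :: an, al + 1)) st

-- A's while-loop; fuel = limit - extendCount (limit = 10000), so the loop guard
-- 'extendCount < limit' is fuel > 0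
def loopA (goal : String) : Nat → List String → List String → Int → Int → Int →
    Std.TreeSet String → List (String × Option String) → List String × Int × Int
  | 0, _, _, ec, ml, _, _, _ => (["MI"], ec, ml)
  | fuel + 1, front, back, ec, ml, alen, vis, anc =>
      let ml' := max ml alen
      match popQ front back with
      | none => ([], ec, ml')
      | some (c, front', back') =>
          if c = goal then (btkA anc 10001 c [], ec, ml')
          else
            match expA c (next_states c) (vis, back', anc, alen - 1) with
            | (v', b', a', l') => loopA goal fuel front' b' (ec + 1) ml' l' v' a'

def breadth_first_dictionarysearch (goal : String) : List String × Int × Int :=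
  loopA goal 10000 ["MI"] [] 0 0 1 ∅ [("MI", none)]

-- ===== PORT B =====
-- B's inner for-loop: each enqueued entry carries its derivation path
def expB (p : List String) (ns : List String)
    (st : Std.TreeSet String × List (String × List String) × Int) :
    Std.TreeSet String × List (String × List String) × Int :=
  ns.foldl (fun st n => match st with
    | (v, bk, al) =>
        if v.contains n then (v, bk, al)
        else (v.insert n, (n, p ++ [n]) :: bk, al + 1)) st

def loopB (goal : String) : Nat → List (String × List String) → List (String × List String) →
    Int → Int → Int → Std.TreeSet String → List String × Int × Int
  | 0, _, _, ec, ml, _, _ => (["MI"], ec, ml)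
  | fuel + 1, front, back, ec, ml, alen, vis =>
      let ml' := max ml alen
      match popQ front back with
      | none => ([], ec, ml')
      | some ((c, p), front', back') =>
          if c = goal then (p, ec, ml')
          else
            match expB p (next_states c) (vis, back', alen - 1) with
            | (v', b', l') => loopB goal fuel front' b' (ec + 1) ml' l' v'

def breadth_first_dictionarysearch_alt (goal : String) : List String × Int × Int :=
  loopB goal 10000 [("MI", ["MI"])] [] 0 0 1 ∅

-- ===== PRECONDITION & SPEC =====
def Spec_breadth_first_dictionarysearch (goal : String) (out : List String × Int × Int) : Prop := out = breadth_first_dictionarysearch_alt goal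
instance (goal : String) (out : List String × Int × Int) : Decidable (Spec_breadth_first_dictionarysearch goal out) := by unfold Spec_breadth_first_dictionarysearch; infer_instance

-- ===== CLAIM (what is proved, stated in full; the proofs are below) =====
def Claim_equal_breadth_first_dictionarysearch : Prop := ∀ (goal : String), Dom_breadth_first_dictionarysearch goal → Spec_breadth_first_dictionarysearch goal (breadth_first_dictionarysearch goal)

-- ===== LEMMAS AND PROOFS =====

-- p is the derivation path of n recorded in anc: p = ["MI", x1, …, n], every step a key of
-- anc pointing at its predecessor, every non-"MI" node in visited (so later inserts of
-- unvisited keys never touch the chain)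
inductive Chain (anc : List (String × Option String)) (vis : Std.TreeSet String) :
    String → List String → Prop
  | base : Chain anc vis "MI" ["MI"]
  | step {m : String} {p : List String} {n : String} :
      Chain anc vis m p → n ≠ "MI" → vis.contains n = true → ancGet anc n = some (some m) →
      Chain anc vis n (p ++ [n])

theorem chain_btk {anc : List (String × Option String)} {vis : Std.TreeSet String}
    {n : String} {p : List String} (h : Chain anc vis n p) :
    ∀ (acc : List String) (fuel : Nat), p.length ≤ fuel → btkA anc fuel n acc = p ++ acc.reverse := by
  induction h with
  | base =>
      intro acc fuel hf
      obtain ⟨f, rfl⟩ : ∃ f, fuel = f + 1 := ⟨fuel - 1, by simp at hf; omega⟩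
      simp [btkA]
  | step hch hne hv hg ih =>
      intro acc fuel hf
      rename_i m p n
      obtain ⟨f, rfl⟩ : ∃ f, fuel = f + 1 := ⟨fuel - 1, by simp at hf; omega⟩
      have hf' : p.length ≤ f := by simp at hf; omega
      simp only [btkA, if_neg hne, hg]
      rw [ih (acc ++ [n]) f hf']
      simp

theorem chain_mono {anc anc' : List (String × Option String)} {vis vis' : Std.TreeSet String}
    {n : String} {p : List String} (h : Chain anc vis n p)
    (hg : ∀ k, vis.contains k = true → ancGet anc' k = ancGet anc k)
    (hv : ∀ k, vis.contains k = true → vis'.contains k = true) : Chain anc' vis' n p := by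
  induction h with
  | base => exact Chain.base
  | step hch hne hvv hgg ih =>
      exact Chain.step ih hne (hv _ hvv) ((hg _ hvv).trans hgg ▸ rfl)

theorem contains_mono_insert {vis : Std.TreeSet String} {n k : String}
    (h : vis.contains k = true) : (vis.insert n).contains k = true := by
  simp [Std.TreeSet.contains_insert, h]

-- one pass of the expansion loops: same visited / agenda-spine / length on both sides, all
-- chains survive, and every new back entry of B carries path p ++ [its node]
theorem exp_rel (c : String) (p : List String) :
    ∀ (ns : List String) (vis : Std.TreeSet String) (backB : List (String × List String))
      (anc : List (String × Option String)) (alen : Int),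
      Chain anc vis c p →
      (∀ e ∈ backB, e.1 ≠ "MI" → Chain anc vis e.1 e.2) →
      ∃ vis' backB' anc' alen',
        expA c ns (vis, backB.map Prod.fst, anc, alen) = (vis', backB'.map Prod.fst, anc', alen') ∧
        expB p ns (vis, backB, alen) = (vis', backB', alen') ∧
        (∀ k, vis.contains k = true → vis'.contains k = true) ∧
        (∀ {m q}, Chain anc vis m q → Chain anc' vis' m q) ∧
        (∀ e ∈ backB', e.1 ≠ "MI" → Chain anc' vis' e.1 e.2) ∧
        (∀ e ∈ backB', e ∈ backB ∨ e.2 = p ++ [e.1]) := by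
  intro ns
  induction ns with
  | nil =>
      intro vis backB anc alen hc hb
      exact ⟨vis, backB, anc, alen, rfl, rfl, fun _ h => h, fun h => h, hb, fun e he => Or.inl he⟩
  | cons n ns ih =>
      intro vis backB anc alen hc hb
      by_cases hn : vis.contains n = true
      · have hA : expA c (n :: ns) (vis, backB.map Prod.fst, anc, alen)
            = expA c ns (vis, backB.map Prod.fst, anc, alen) := by
          simp [expA, List.foldl, hn]
        have hB : expB p (n :: ns) (vis, backB, alen) = expB p ns (vis, backB, alen) := by
          simp [expB, List.foldl, hn]
        rw [hA, hB]; exact ih vis backB anc alen hc hb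
      · have hn' : vis.contains n = false := by
          cases h : vis.contains n with
          | false => rfl
          | true => exact absurd h hn
        have hne : ∀ k, vis.contains k = true → k ≠ n := by
          intro k hk he; rw [he, hn'] at hk; cases hk
        have hgmono : ∀ k, vis.contains k = true →
            ancGet ((n, some c) :: anc) k = ancGet anc k := by
          intro k hk; simp [ancGet, (hne k hk).symm]
        have hvmono : ∀ k, vis.contains k = true → (vis.insert n).contains k = true :=
          fun k hk => contains_mono_insert hk
        have hmono : ∀ {m q}, Chain anc vis m q → Chain ((n, some c) :: anc) (vis.insert n) m q :=
          fun h => chain_mono h hgmono hvmono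
        have hc1 : Chain ((n, some c) :: anc) (vis.insert n) c p := hmono hc
        have hb1 : ∀ e ∈ ((n, p ++ [n]) :: backB), e.1 ≠ "MI" →
            Chain ((n, some c) :: anc) (vis.insert n) e.1 e.2 := by
          intro e he hme
          rcases List.mem_cons.mp he with h | h
          · subst h
            exact Chain.step hc1 hme (by simp [Std.TreeSet.contains_insert]) (by simp [ancGet])
          · exact hmono (hb e h hme)
        have hA : expA c (n :: ns) (vis, backB.map Prod.fst, anc, alen)
            = expA c ns (vis.insert n, ((n, p ++ [n]) :: backB).map Prod.fst,
                (n, some c) :: anc, alen + 1) := by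
          simp [expA, List.foldl, hn']
        have hB : expB p (n :: ns) (vis, backB, alen)
            = expB p ns (vis.insert n, (n, p ++ [n]) :: backB, alen + 1) := by
          simp [expB, List.foldl, hn']
        rw [hA, hB]
        obtain ⟨vis', backB', anc', alen', e1, e2, e3, e4, e5, e6⟩ :=
          ih (vis.insert n) ((n, p ++ [n]) :: backB) ((n, some c) :: anc) (alen + 1) hc1 hb1
        refine ⟨vis', backB', anc', alen', e1, e2, ?_, ?_, e5, ?_⟩
        · exact fun k hk => e3 k (hvmono k hk)
        · exact fun h => e4 (hmono h)
        · intro e he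
          rcases e6 e he with h | h
          · rcases List.mem_cons.mp h with h' | h'
            · subst h'; exact Or.inr rfl
            · exact Or.inl h'
          · exact Or.inr h

theorem ns_MI : next_states "MI" = ["MIU", "MII"] := by decide

-- the invariant carried around the while-loop (for B's agenda; A's agenda is its fst-spine)
def BfsInv (anc : List (String × Option String)) (vis : Std.TreeSet String) (ec : Int)
    (es : List (String × List String)) : Prop :=
  ∀ e ∈ es, e.1 ≠ "MI" → Chain anc vis e.1 e.2 ∧ (e.2.length : Int) ≤ ec + 1

-- the loop body after a successful pop of entry (c, p); ih is the induction hypothesis for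
-- the remaining fuel
theorem after_pop (goal : String) (hg : goal ≠ "MI") (fuel : Nat)
    (ih : ∀ (frontB backB : List (String × List String)) (ec ml alen : Int)
        (vis : Std.TreeSet String) (anc : List (String × Option String)),
        ec + fuel = 10000 → BfsInv anc vis ec (frontB ++ backB) →
        vis.contains "MIU" = true → vis.contains "MII" = true →
        loopA goal fuel (frontB.map Prod.fst) (backB.map Prod.fst) ec ml alen vis anc
          = loopB goal fuel frontB backB ec ml alen vis)
    (c : String) (p : List String) (front' back' : List (String × List String))
    (ec ml alen : Int) (vis : Std.TreeSet String) (anc : List (String × Option String))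
    (hec : ec + (fuel + 1 : Nat) = 10000)
    (hin : BfsInv anc vis ec ((c, p) :: (front' ++ back')))
    (h1 : vis.contains "MIU" = true) (h2 : vis.contains "MII" = true) :
    (if c = goal then (btkA anc 10001 c [], ec, ml) else
      match expA c (next_states c) (vis, back'.map Prod.fst, anc, alen - 1) with
      | (v', b', a', l') => loopA goal fuel (front'.map Prod.fst) b' (ec + 1) ml l' v' a')
    = (if c = goal then (p, ec, ml) else
      match expB p (next_states c) (vis, back', alen - 1) with
      | (v', b', l') => loopB goal fuel front' b' (ec + 1) ml l' v') := by
  by_cases hcg : c = goal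
  · subst hcg
    have hcc : c ≠ "MI" := hg
    obtain ⟨hch, hlen⟩ := hin (c, p) (List.mem_cons_self) hcc
    have hlen' : (p.length : Int) ≤ ec + 1 := hlen
    have hfl : p.length ≤ 10001 := by push_cast at hec; omega
    have : btkA anc 10001 c [] = p := by
      rw [chain_btk hch [] 10001 hfl]; simp
    simp [this]
  · rw [if_neg hcg, if_neg hcg]
    by_cases hcm : c = "MI"
    · subst hcm
      have hA : expA "MI" (next_states "MI") (vis, back'.map Prod.fst, anc, alen - 1)
          = (vis, back'.map Prod.fst, anc, alen - 1) := by
        rw [ns_MI]; simp [expA, List.foldl, h1, h2]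
      have hB : expB p (next_states "MI") (vis, back', alen - 1) = (vis, back', alen - 1) := by
        rw [ns_MI]; simp [expB, List.foldl, h1, h2]
      rw [hA, hB]
      exact ih front' back' (ec + 1) ml (alen - 1) vis anc (by push_cast at hec ⊢; omega)
        (by
          intro e he hme
          obtain ⟨hch, hlen⟩ := hin e (List.mem_cons_of_mem _ he) hme
          exact ⟨hch, by omega⟩) h1 h2
    · obtain ⟨hch, hlen⟩ := hin (c, p) (List.mem_cons_self) hcm
      obtain ⟨vis', backB', anc', alen', e1, e2, e3, e4, e5, e6⟩ :=
        exp_rel c p (next_states c) vis back' anc (alen - 1) hch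
          (fun e he hme => (hin e (List.mem_cons_of_mem _ (List.mem_append_right _ he)) hme).1)
      rw [e1, e2]
      exact ih front' backB' (ec + 1) ml alen' vis' anc' (by push_cast at hec ⊢; omega)
        (by
          intro e he hme
          rcases List.mem_append.mp he with h | h
          · obtain ⟨hc', hl'⟩ := hin e (List.mem_cons_of_mem _ (List.mem_append_left _ h)) hme
            exact ⟨e4 hc', by omega⟩
          · refine ⟨e5 e h hme, ?_⟩
            rcases e6 e h with h' | h'
            · have := (hin e (List.mem_cons_of_mem _ (List.mem_append_right _ h')) hme).2
              omega
            · rw [h']; simp; omega)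
        (e3 _ h1) (e3 _ h2)

theorem loop_rel (goal : String) (hg : goal ≠ "MI") :
    ∀ (fuel : Nat) (frontB backB : List (String × List String)) (ec ml alen : Int)
      (vis : Std.TreeSet String) (anc : List (String × Option String)),
      ec + fuel = 10000 → BfsInv anc vis ec (frontB ++ backB) →
      vis.contains "MIU" = true → vis.contains "MII" = true →
      loopA goal fuel (frontB.map Prod.fst) (backB.map Prod.fst) ec ml alen vis anc
        = loopB goal fuel frontB backB ec ml alen vis := by
  intro fuel
  induction fuel with
  | zero => intro frontB backB ec ml alen vis anc _ _ _ _; rfl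
  | succ fuel ih =>
      intro frontB backB ec ml alen vis anc hec hin h1 h2
      match frontB with
      | (c, p) :: front' =>
          have := after_pop goal hg fuel ih c p front' backB ec (max ml alen) (alen) vis anc hec hin h1 h2
          simpa [loopA, loopB, popQ] using this
      | [] =>
          match hrev : backB.reverse with
          | [] =>
              have hb : backB = [] := by
                have := congrArg List.reverse hrev; simpa using this
              subst hb
              simp [loopA, loopB, popQ]
          | (c, p) :: rest =>
              have hmaprev : (backB.map Prod.fst).reverse = c :: rest.map Prod.fst := by
                rw [← List.map_reverse, hrev]; rfl
              have hpA : popQ ([] : List String) (backB.map Prod.fst)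
                  = some (c, rest.map Prod.fst, []) := by
                simp [popQ, hmaprev]
              have hpB : popQ ([] : List (String × List String)) backB
                  = some ((c, p), rest, []) := by
                simp [popQ, hrev]
              have hin' : BfsInv anc vis ec ((c, p) :: (rest ++ ([] : List (String × List String)))) := by
                intro e he hme
                refine hin e ?_ hme
                rcases List.mem_cons.mp he with h | h
                · subst h
                  exact List.mem_append_right _ (List.mem_reverse.mp (hrev ▸ List.mem_cons_self))
                · simp at h
                  exact List.mem_append_right _ (List.mem_reverse.mp (hrev ▸ List.mem_cons_of_mem _ h))
              have := after_pop goal hg fuel ih c p rest [] ec (max ml alen) alen vis anc hec hin' h1 h2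
              simp only [loopA, loopB, List.map_nil, hpA, hpB]
              simpa using this

theorem loopA_step (goal : String) (fuel : Nat) (front back : List String) (ec ml alen : Int)
    (vis : Std.TreeSet String) (anc : List (String × Option String)) :
    loopA goal (fuel + 1) front back ec ml alen vis anc
      = (match popQ front back with
        | none => ([], ec, max ml alen)
        | some (c, front', back') =>
            if c = goal then (btkA anc 10001 c [], ec, max ml alen)
            else
              match expA c (next_states c) (vis, back', anc, alen - 1) with
              | (v', b', a', l') => loopA goal fuel front' b' (ec + 1) (max ml alen) l' v' a') := rfl

theorem loopB_step (goal : String) (fuel : Nat) (front back : List (String × List String))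
    (ec ml alen : Int) (vis : Std.TreeSet String) :
    loopB goal (fuel + 1) front back ec ml alen vis
      = (match popQ front back with
        | none => ([], ec, max ml alen)
        | some ((c, p), front', back') =>
            if c = goal then (p, ec, max ml alen)
            else
              match expB p (next_states c) (vis, back', alen - 1) with
              | (v', b', l') => loopB goal fuel front' b' (ec + 1) (max ml alen) l' v') := rfl

theorem first_step (goal : String) (hg : goal ≠ "MI") :
    breadth_first_dictionarysearch goal = breadth_first_dictionarysearch_alt goal := by
  have hMIg : ¬ ("MI" = goal) := fun h => hg h.symm
  have hexpA : expA "MI" (next_states "MI")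
      ((∅ : Std.TreeSet String), ([] : List String), [("MI", (none : Option String))], (1 : Int) - 1)
      = (((∅ : Std.TreeSet String).insert "MIU").insert "MII", ["MII", "MIU"],
          [("MII", some "MI"), ("MIU", some "MI"), ("MI", none)], (2 : Int)) := by rfl
  have hexpB : expB ["MI"] (next_states "MI")
      ((∅ : Std.TreeSet String), ([] : List (String × List String)), (1 : Int) - 1)
      = (((∅ : Std.TreeSet String).insert "MIU").insert "MII",
          [("MII", ["MI", "MII"]), ("MIU", ["MI", "MIU"])], (2 : Int)) := by rfl
  rw [breadth_first_dictionarysearch, breadth_first_dictionarysearch_alt,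
      show (10000 : Nat) = 9999 + 1 from rfl, loopA_step, loopB_step]
  simp only [popQ, if_neg hMIg, hexpA, hexpB]
  have h1 : ((((∅ : Std.TreeSet String).insert "MIU").insert "MII").contains "MIU") = true := by
    simp [Std.TreeSet.contains_insert]
  have h2 : ((((∅ : Std.TreeSet String).insert "MIU").insert "MII").contains "MII") = true := by
    simp [Std.TreeSet.contains_insert]
  have hanc : ancGet [("MII", some "MI"), ("MIU", some "MI"), ("MI", none)] "MII"
      = some (some "MI") := by decide
  have hanc2 : ancGet [("MII", some "MI"), ("MIU", some "MI"), ("MI", none)] "MIU"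
      = some (some "MI") := by decide
  have hin : BfsInv [("MII", some "MI"), ("MIU", some "MI"), ("MI", none)]
      (((∅ : Std.TreeSet String).insert "MIU").insert "MII") 1
      ([] ++ [("MII", ["MI", "MII"]), ("MIU", ["MI", "MIU"])]) := by
    intro e he hme
    simp only [List.nil_append, List.mem_cons] at he
    rcases he with h | h | h
    · subst h
      refine ⟨?_, by simp⟩
      exact Chain.step (p := ["MI"]) Chain.base (by decide) h2 hanc
    · subst h
      refine ⟨?_, by simp⟩
      exact Chain.step (p := ["MI"]) Chain.base (by decide) h1 hanc2
    · cases h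
  have := loop_rel goal hg 9999 [] [("MII", ["MI", "MII"]), ("MIU", ["MI", "MIU"])] (0 + 1)
      (max 0 1) 2 (((∅ : Std.TreeSet String).insert "MIU").insert "MII")
      [("MII", some "MI"), ("MIU", some "MI"), ("MI", none)] (by norm_num)
      (by norm_num at hin ⊢; exact hin) h1 h2
  simpa using this

-- ===== VERDICT (by name: the statement is the Claim_ definition above) =====
theorem breadth_first_dictionarysearch_spec : Claim_equal_breadth_first_dictionarysearch := by
  intro goal _
  unfold Spec_breadth_first_dictionarysearch
  by_cases h : goal = "MI"
  · subst h; decide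
  · exact first_step goal h
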